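-- pv_equiv track=rewrite | github.com/fernandodpr/zbx-asn | zbx_asn.py | _norm_list_str
-- ===== SOURCE A (Python) =====
-- from typing import List, Optional, Set, Tuple
--
-- def _norm_list_str(s: str) -> List[str]:
--     if not s:
--         return []
--     items = [x.strip() for x in s.split(",")]
--     norm = []
--     seen = set()
--     for it in items:
--         if not it:
--             continue
--         key = it.casefold()
--         if key not in seen:
--             seen.add(key)
--             norm.append(it)
--     norm.sort(key=lambda x: x.casefold())
--     return norm
-- ===== SOURCE B (Python) =====
-- def _norm_list_str(s: str) -> 'List[str]':
--     items = [x.strip() for x in s.split(",")]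
--     items = [x for x in items if x]
--     out = []
--     last_key = None
--     for it in sorted(items, key=str.casefold):
--         key = it.casefold()
--         if key != last_key:
--             out.append(it)
--             last_key = key
--     return out
-- ===== Notes on version B (the rewrite author's own statement) =====
-- stated objective: alternative
-- what changed: Instead of hash-set dedup in original order followed by a sort, B stably sorts all stripped items by casefold first and then removes duplicates in one adjacent-comparison pass (tracking only the last emitted key), relying on sort stability to keep the same first-occurrence representative per key.
import Mathlib
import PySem

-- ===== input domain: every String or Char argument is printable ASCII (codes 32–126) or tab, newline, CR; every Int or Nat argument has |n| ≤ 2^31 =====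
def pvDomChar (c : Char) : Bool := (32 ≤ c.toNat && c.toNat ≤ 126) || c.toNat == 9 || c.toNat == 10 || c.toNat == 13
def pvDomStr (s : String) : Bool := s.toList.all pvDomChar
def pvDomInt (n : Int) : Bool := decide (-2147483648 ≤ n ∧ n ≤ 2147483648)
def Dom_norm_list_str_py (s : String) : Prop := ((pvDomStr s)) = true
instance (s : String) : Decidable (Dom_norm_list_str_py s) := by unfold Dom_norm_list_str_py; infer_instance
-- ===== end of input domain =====

-- B replaces A's hash-set dedup (in original order) followed by a sort with: sort everything
-- stably by key first, then one adjacent-comparison pass keeping the first item of each key run.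
-- Same return value on the whole domain; 'casefold' is ported as ASCII lower, exact on Dom.

-- ===== PORT A =====
-- key = it.casefold()  (casefold coincides with lower on the ASCII domain)
def pvKey (x : String) : String := PySem.Str.lower x

-- the body of A's 'for it in items' loop, threading the state (norm, seen)
def pvStepA (st : List String × PySem.Set String) (it : String) : List String × PySem.Set String :=
  if it = "" then st                                   -- 'if not it: continue'
  else if PySem.Set.contains st.2 (pvKey it) then st   -- 'if key not in seen' (negated branch)
  else (st.1 ++ [it], PySem.Set.add st.2 (pvKey it))   -- seen.add(key); norm.append(it)

def norm_list_str_py (s : String) : List String :=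
  if s = "" then []                                    -- 'if not s: return []'
  else
    let items := ((PySem.Str.split? s ",").getD []).map (fun x => PySem.Str.strip x)
    let r := items.foldl pvStepA ([], PySem.Set.ofList [])
    PySem.List.sorted r.1 pvKey                        -- norm.sort(key=lambda x: x.casefold())

-- ===== PORT B =====
-- one pass over the sorted list: keep 'it' only when its key differs from the last kept key
def pvScanB (last : Option String) : List String → List String
  | [] => []
  | it :: rest =>
    if some (pvKey it) = last then pvScanB last rest
    else it :: pvScanB (some (pvKey it)) rest

def norm_list_str_py_alt (s : String) : List String :=
  let items := (((PySem.Str.split? s ",").getD []).map (fun x => PySem.Str.strip x)).filter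
      (fun x => x != "")
  pvScanB none (PySem.List.sorted items pvKey)

-- ===== PRECONDITION & SPEC =====
def Spec_norm_list_str_py (s : String) (out : List String) : Prop := out = norm_list_str_py_alt s
instance (s : String) (out : List String) : Decidable (Spec_norm_list_str_py s out) := by unfold Spec_norm_list_str_py; infer_instance

-- ===== CLAIM (what is proved, stated in full; the proofs are below) =====
def Claim_equal_norm_list_str_py : Prop := ∀ (s : String), Dom_norm_list_str_py s → Spec_norm_list_str_py s (norm_list_str_py s)

-- ===== LEMMAS AND PROOFS =====

lemma pv_contains_iff (s : PySem.Set String) (x : String) :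
    PySem.Set.contains s x = true ↔ x ∈ s := by
  simp [PySem.Set.contains]

-- A's loop over the already-filtered items, in direct recursive form
def pvGoA (seen : PySem.Set String) : List String → List String
  | [] => []
  | x :: xs =>
    if PySem.Set.contains seen (pvKey x) then pvGoA seen xs
    else x :: pvGoA (PySem.Set.add seen (pvKey x)) xs

lemma pvFoldA_eq (l : List String) : ∀ (seen : PySem.Set String) (acc : List String),
    (List.foldl pvStepA (acc, seen) l).1 = acc ++ pvGoA seen (l.filter (fun x => x != "")) := by
  induction l with
  | nil => intro seen acc; simp [pvGoA]
  | cons x xs ih =>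
    intro seen acc
    by_cases hx : x = ""
    · simp [pvStepA, hx, ih]
    · by_cases hc : pvKey x ∈ seen
      · simp [pvStepA, hx, hc, pvGoA, ih]
      · simp [pvStepA, hx, hc, pvGoA, ih]

-- insertBy by a strict key comparison preserves key-sortedness
lemma pv_pairwise_insertBy (x : String) : ∀ (ys : List String),
    ys.Pairwise (fun a b => pvKey a ≤ pvKey b) →
    (PySem.List.insertBy (fun a b => decide (pvKey a < pvKey b)) x ys).Pairwise
      (fun a b => pvKey a ≤ pvKey b) := by
  intro ys
  induction ys with
  | nil => intro _; simp [PySem.List.insertBy]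
  | cons y ys ih =>
    intro h
    rw [List.pairwise_cons] at h
    by_cases hlt : pvKey x < pvKey y
    · simp only [PySem.List.insertBy, hlt, decide_true, if_pos]
      refine List.pairwise_cons.mpr ⟨?_, List.pairwise_cons.mpr h⟩
      intro z hz
      rcases List.mem_cons.mp hz with rfl | hz
      · exact le_of_lt hlt
      · exact le_trans (le_of_lt hlt) (h.1 z hz)
    · simp only [PySem.List.insertBy, hlt, decide_false, if_neg, Bool.false_eq_true,
        not_false_iff]
      refine List.pairwise_cons.mpr ⟨?_, ih h.2⟩
      intro z hz
      rcases (PySem.List.mem_insertBy _ x z ys).mp hz with rfl | hz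
      · exact le_of_not_gt hlt
      · exact h.1 z hz

lemma pv_find?_insertBy_ne (before : String → String → Bool) (p : String → Bool) (x : String)
    (hpx : p x = false) : ∀ (ys : List String),
    (PySem.List.insertBy before x ys).find? p = ys.find? p := by
  intro ys
  induction ys with
  | nil => simp [PySem.List.insertBy, hpx]
  | cons y ys ih =>
    by_cases hb : before x y
    · simp [PySem.List.insertBy, hb, hpx]
    · cases hpy : p y with
      | true => simp [PySem.List.insertBy, hb, List.find?, hpy]
      | false => simp [PySem.List.insertBy, hb, List.find?, hpy, ih]

lemma pv_find?_insertBy_eq (x : String) : ∀ (ys : List String),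
    ys.Pairwise (fun a b => pvKey a ≤ pvKey b) →
    (PySem.List.insertBy (fun a b => decide (pvKey a < pvKey b)) x ys).find?
        (fun y => pvKey y == pvKey x)
      = (ys.find? (fun y => pvKey y == pvKey x)).or (some x) := by
  intro ys
  induction ys with
  | nil => simp [PySem.List.insertBy]
  | cons y ys ih =>
    intro h
    rw [List.pairwise_cons] at h
    by_cases hlt : pvKey x < pvKey y
    · have hnone : (y :: ys).find? (fun y => pvKey y == pvKey x) = none := by
        rw [List.find?_eq_none]
        intro z hz
        have hyz : pvKey y ≤ pvKey z := by
          rcases List.mem_cons.mp hz with rfl | hz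
          · exact le_refl _
          · exact h.1 z hz
        simp only [beq_iff_eq]
        exact fun he => absurd (he ▸ lt_of_lt_of_le hlt hyz) (lt_irrefl _)
      rw [PySem.List.insertBy, if_pos (by simp [hlt]), hnone,
        List.find?_cons_of_pos (by simp)]
      rfl
    · cases hpy : (pvKey y == pvKey x) with
      | true =>
        rw [PySem.List.insertBy, if_neg (by simp [hlt]),
          List.find?_cons_of_pos (p := fun z => pvKey z == pvKey x) hpy,
          List.find?_cons_of_pos (p := fun z => pvKey z == pvKey x) hpy]
        rfl
      | false =>
        rw [PySem.List.insertBy, if_neg (by simp [hlt]),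
          List.find?_cons_of_neg (p := fun z => pvKey z == pvKey x) (by simp [hpy]),
          List.find?_cons_of_neg (p := fun z => pvKey z == pvKey x) (by simp [hpy]),
          ih h.2]

-- find? of a key-match commutes with the insertion-sort fold (stability at the level of find?)
lemma pv_find?_foldl_insertBy (c : String) : ∀ (ts acc : List String),
    acc.Pairwise (fun a b => pvKey a ≤ pvKey b) →
    (ts.foldl (fun acc x => PySem.List.insertBy (fun a b => decide (pvKey a < pvKey b)) x acc)
        acc).find? (fun y => pvKey y == c)
      = (acc.find? (fun y => pvKey y == c)).or (ts.find? (fun y => pvKey y == c)) := by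
  intro ts
  induction ts with
  | nil => intro acc _; simp
  | cons x ts ih =>
    intro acc hacc
    have hacc' := pv_pairwise_insertBy x acc hacc
    rw [List.foldl_cons, ih _ hacc']
    by_cases hc : pvKey x = c
    · subst hc
      rw [pv_find?_insertBy_eq x acc hacc, Option.or_assoc,
        List.find?_cons_of_pos (p := fun y => pvKey y == pvKey x) (by simp)]
      rfl
    · have hpx : (pvKey x == c) = false := by simp [hc]
      rw [pv_find?_insertBy_ne (fun a b => decide (pvKey a < pvKey b))
        (fun y => pvKey y == c) x hpx acc,
        List.find?_cons_of_neg (by simp [hpx])]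

-- stability: the first item with a given key is the same before and after sorting
lemma pv_find?_sorted (ts : List String) (c : String) :
    (PySem.List.sorted ts pvKey).find? (fun y => pvKey y == c)
      = ts.find? (fun y => pvKey y == c) := by
  rw [PySem.List.sorted_eq_foldl_insertBy]
  simpa using pv_find?_foldl_insertBy c ts [] List.Pairwise.nil

lemma pv_goA_key_not_seen : ∀ (l : List String) (seen : PySem.Set String) (y : String),
    y ∈ pvGoA seen l → pvKey y ∉ seen := by
  intro l
  induction l with
  | nil => intro seen y hy; simp [pvGoA] at hy
  | cons x xs ih =>
    intro seen y hy
    by_cases hc : PySem.Set.contains seen (pvKey x)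
    · rw [pvGoA, if_pos hc] at hy
      exact ih seen y hy
    · rw [pvGoA, if_neg hc] at hy
      rcases List.mem_cons.mp hy with rfl | hy
      · exact fun hmem => hc ((pv_contains_iff seen (pvKey y)).mpr hmem)
      · intro hmem
        exact (ih _ y hy) ((PySem.Set.mem_add seen (pvKey x) (pvKey y)).mpr (Or.inl hmem))

lemma pv_nodup_goA : ∀ (l : List String) (seen : PySem.Set String), (pvGoA seen l).Nodup := by
  intro l
  induction l with
  | nil => intro seen; simp [pvGoA]
  | cons x xs ih =>
    intro seen
    by_cases hc : PySem.Set.contains seen (pvKey x)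
    · rw [pvGoA, if_pos hc]; exact ih seen
    · rw [pvGoA, if_neg hc]
      refine List.nodup_cons.mpr ⟨?_, ih _⟩
      intro hx
      exact (pv_goA_key_not_seen _ _ _ hx)
        ((PySem.Set.mem_add seen (pvKey x) (pvKey x)).mpr (Or.inr rfl))

-- membership in A's dedup = being the first element carrying one's key (and the key unseen)
lemma pv_mem_goA : ∀ (l : List String) (seen : PySem.Set String) (x : String),
    x ∈ pvGoA seen l ↔
      (pvKey x ∉ seen ∧ l.find? (fun y => pvKey y == pvKey x) = some x) := by
  intro l
  induction l with
  | nil => intro seen x; simp [pvGoA]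
  | cons y l ih =>
    intro seen x
    by_cases hmem : PySem.Set.contains seen (pvKey y)
    · rw [pvGoA, if_pos hmem]
      by_cases hpy : pvKey y = pvKey x
      · have hseen : pvKey x ∈ seen := hpy ▸ (pv_contains_iff seen (pvKey y)).mp hmem
        constructor
        · intro hx; exact absurd hseen ((ih seen x).mp hx).1
        · rintro ⟨hns, _⟩; exact absurd hseen hns
      · rw [ih seen x, List.find?_cons_of_neg (by simp [hpy])]
    · rw [pvGoA, if_neg hmem]
      have hyns : pvKey y ∉ seen := fun h => hmem ((pv_contains_iff seen (pvKey y)).mpr h)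
      by_cases hpy : pvKey y = pvKey x
      · have hfind : (y :: l).find? (fun z => pvKey z == pvKey x) = some y :=
          List.find?_cons_of_pos (by simp [hpy])
        rw [hfind]
        constructor
        · intro hx
          rcases List.mem_cons.mp hx with rfl | hx
          · exact ⟨hpy ▸ hyns, rfl⟩
          · have := ((ih _ x).mp hx).1
            exact absurd ((PySem.Set.mem_add seen (pvKey y) (pvKey x)).mpr (Or.inr hpy.symm))
              this
        · rintro ⟨_, heq⟩
          exact (Option.some.injEq _ _ ▸ heq : y = x) ▸ List.mem_cons_self
      · have hfind : (y :: l).find? (fun z => pvKey z == pvKey x)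
            = l.find? (fun z => pvKey z == pvKey x) :=
          List.find?_cons_of_neg (by simp [hpy])
        rw [hfind]
        simp only [List.mem_cons, ih (PySem.Set.add seen (pvKey y)) x, PySem.Set.mem_add]
        constructor
        · rintro (rfl | ⟨hns, hf⟩)
          · exact absurd rfl hpy
          · exact ⟨fun h => hns (Or.inl h), hf⟩
        · rintro ⟨hns, hf⟩
          exact Or.inr ⟨fun h => (h.elim hns (fun he => hpy he.symm)), hf⟩

-- B's scan over a key-sorted list yields strictly increasing keys
lemma pv_scanB_lt : ∀ (l : List String) (c : String),
    l.Pairwise (fun a b => pvKey a ≤ pvKey b) →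
    (∀ y ∈ l, c ≤ pvKey y) →
    (∀ y ∈ pvScanB (some c) l, c < pvKey y) ∧
      (pvScanB (some c) l).Pairwise (fun a b => pvKey a < pvKey b) := by
  intro l
  induction l with
  | nil => intro c _ _; simp [pvScanB]
  | cons x l ih =>
    intro c hpw hlb
    rw [List.pairwise_cons] at hpw
    by_cases hx : some (pvKey x) = some c
    · rw [pvScanB, if_pos hx]
      exact ih c hpw.2 (fun y hy => hlb y (List.mem_cons_of_mem _ hy))
    · rw [pvScanB, if_neg hx]
      have hcx : c < pvKey x :=
        lt_of_le_of_ne (hlb x List.mem_cons_self)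
          (fun he => hx (by rw [he]))
      have hrec := ih (pvKey x) hpw.2 hpw.1
      refine ⟨?_, List.pairwise_cons.mpr ⟨hrec.1, hrec.2⟩⟩
      intro y hy
      rcases List.mem_cons.mp hy with rfl | hy
      · exact hcx
      · exact lt_trans hcx (hrec.1 y hy)

-- on a key-sorted list, A's set-based dedup and B's adjacent scan coincide
lemma pv_goA_eq_scanB : ∀ (l : List String) (seen : PySem.Set String) (c : String),
    l.Pairwise (fun a b => pvKey a ≤ pvKey b) →
    (∀ y ∈ l, c ≤ pvKey y) →
    (∀ y ∈ l, (pvKey y ∈ seen ↔ pvKey y = c)) →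
    pvGoA seen l = pvScanB (some c) l := by
  intro l
  induction l with
  | nil => intro seen c _ _ _; simp [pvGoA, pvScanB]
  | cons x l ih =>
    intro seen c hpw hlb hseen
    rw [List.pairwise_cons] at hpw
    by_cases hx : pvKey x = c
    · have hmem : PySem.Set.contains seen (pvKey x) = true :=
        (pv_contains_iff _ _).mpr ((hseen x List.mem_cons_self).mpr hx)
      rw [pvGoA, if_pos hmem, pvScanB, if_pos (by rw [hx])]
      exact ih seen c hpw.2 (fun y hy => hlb y (List.mem_cons_of_mem _ hy))
        (fun y hy => hseen y (List.mem_cons_of_mem _ hy))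
    · have hmem : ¬ PySem.Set.contains seen (pvKey x) = true := by
        intro h
        exact hx ((hseen x List.mem_cons_self).mp ((pv_contains_iff _ _).mp h))
      rw [pvGoA, if_neg hmem, pvScanB, if_neg (fun h => hx (Option.some.injEq _ _ ▸ h))]
      congr 1
      refine ih _ (pvKey x) hpw.2 hpw.1 ?_
      intro y hy
      rw [PySem.Set.mem_add]
      constructor
      · rintro (h | h)
        · have hyc := (hseen y (List.mem_cons_of_mem _ hy)).mp h
          have : pvKey x ≤ pvKey y := hpw.1 y hy
          have : pvKey x ≤ c := hyc ▸ this
          exact absurd (le_antisymm this (hlb x List.mem_cons_self)) hx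
        · exact h
      · exact Or.inr

lemma pv_goA_empty_eq_scanB (l : List String)
    (hpw : l.Pairwise (fun a b => pvKey a ≤ pvKey b)) :
    pvGoA (PySem.Set.ofList []) l = pvScanB none l := by
  cases l with
  | nil => simp [pvGoA, pvScanB]
  | cons x l =>
    rw [List.pairwise_cons] at hpw
    have hmem : ¬ PySem.Set.contains (PySem.Set.ofList ([] : List String)) (pvKey x) = true := by
      simp [PySem.Set.contains, PySem.Set.ofList]
    rw [pvGoA, if_neg hmem, pvScanB, if_neg (by simp)]
    congr 1
    refine pv_goA_eq_scanB l _ (pvKey x) hpw.2 hpw.1 ?_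
    intro y hy
    rw [PySem.Set.mem_add]
    simp [PySem.Set.ofList, eq_comm]

-- the central fact: dedup-then-sort equals sort-then-adjacent-dedup
lemma pv_main (ts : List String) :
    PySem.List.sorted (pvGoA (PySem.Set.ofList []) ts) pvKey
      = pvScanB none (PySem.List.sorted ts pvKey) := by
  have hpw := PySem.List.sorted_pairwise ts pvKey
  rw [← pv_goA_empty_eq_scanB _ hpw]
  apply PySem.List.sorted_eq_of_perm_of_pairwise_lt
  · -- permutation: both keep exactly the first item of each key, one per key
    rw [List.perm_ext_iff_of_nodup (pv_nodup_goA _ _) (pv_nodup_goA _ _)]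
    intro x
    rw [pv_mem_goA, pv_mem_goA, pv_find?_sorted]
  · -- strictly increasing keys
    cases hs : PySem.List.sorted ts pvKey with
    | nil => simp [pvGoA]
    | cons y l =>
      have hpw' := hs ▸ hpw
      rw [List.pairwise_cons] at hpw'
      have hmem : ¬ PySem.Set.contains (PySem.Set.ofList ([] : List String)) (pvKey y) = true := by
        simp [PySem.Set.contains, PySem.Set.ofList]
      rw [pvGoA, if_neg hmem]
      rw [pv_goA_eq_scanB l _ (pvKey y) hpw'.2 hpw'.1 ?side]
      case side =>
        intro z hz
        rw [PySem.Set.mem_add]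
        simp [PySem.Set.ofList, eq_comm]
      have hrec := pv_scanB_lt l (pvKey y) hpw'.2 hpw'.1
      exact List.pairwise_cons.mpr ⟨hrec.1, hrec.2⟩

-- ===== VERDICT (by name: the statement is the Claim_ definition above) =====
theorem norm_list_str_py_spec : Claim_equal_norm_list_str_py := by
  unfold Claim_equal_norm_list_str_py
  intro s _
  unfold Spec_norm_list_str_py norm_list_str_py norm_list_str_py_alt
  by_cases hs : s = ""
  · subst hs; decide
  · rw [if_neg hs]
    simp only []
    rw [pvFoldA_eq _ _ [], List.nil_append, pv_main]
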